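-- pv_equiv track=rewrite | github.com/XinnuoXu/AdventofCode | 2019/day_10.py | get_n_destroy
-- ===== SOURCE A (Python) =====
-- def get_n_destroy(destroy_list, n):
--     idx = 0; len_list = len(destroy_list)
--     while idx < n:
--         for i in range(len_list):
--             if len(destroy_list[i]) == 0:
--                 continue
--             (x, y) = destroy_list[i].pop(0)
--             idx += 1
--             if idx == n:
--                 return x, y
--     return -1, -1
-- ===== SOURCE B (Python) =====
-- def get_n_destroy(destroy_list, n):
--     # Return-value equivalent to A wherever A terminates; does not mutate destroy_list.
--     max_len = max(map(len, destroy_list), default=0)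
--     order = [b[r] for r in range(max_len) for b in destroy_list if len(b) > r]
--     if 1 <= n <= len(order):
--         return order[n - 1]
--     return -1, -1
-- ===== Notes on version B (the rewrite author's own statement) =====
-- stated objective: simpler
-- what changed: B builds the whole round-robin destruction order once as a flat list (round r contributes b[r] of every bucket longer than r) and indexes it at n-1, instead of A's pass-by-pass simulation that mutates the buckets by popping from their fronts.
import Mathlib
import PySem

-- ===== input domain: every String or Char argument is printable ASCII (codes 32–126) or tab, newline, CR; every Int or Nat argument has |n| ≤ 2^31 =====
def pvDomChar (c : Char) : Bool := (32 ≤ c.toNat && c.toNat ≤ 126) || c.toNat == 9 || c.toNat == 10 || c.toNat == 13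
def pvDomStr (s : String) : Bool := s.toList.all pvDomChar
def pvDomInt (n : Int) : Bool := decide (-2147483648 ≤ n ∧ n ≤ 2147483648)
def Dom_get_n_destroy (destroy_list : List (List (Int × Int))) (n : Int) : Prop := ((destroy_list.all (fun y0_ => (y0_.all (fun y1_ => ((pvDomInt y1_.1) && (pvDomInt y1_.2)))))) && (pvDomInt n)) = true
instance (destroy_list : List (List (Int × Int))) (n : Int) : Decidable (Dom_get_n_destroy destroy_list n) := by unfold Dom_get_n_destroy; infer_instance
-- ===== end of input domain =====

-- ===== PORT A =====
-- B builds the destruction order once and indexes it; A simulates pass-by-pass popping.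
-- Equivalence is about the RETURN value only: Python A pops from the input buckets in place, B does not mutate.
-- One inner for-loop pass of A over all buckets: pops the head of each nonempty bucket,
-- incrementing idx, returning (x, y) as soon as idx hits n.
def passA : List (List (Int × Int)) → Int → Int → ((Int × Int) ⊕ (List (List (Int × Int)) × Int))
  | [], idx, _ => Sum.inr ([], idx)
  | b :: rest, idx, n =>
    match b with
    | [] =>
      match passA rest idx n with
      | Sum.inl r => Sum.inl r
      | Sum.inr (rs, idx') => Sum.inr ([] :: rs, idx')
    | (x, y) :: tl =>
      if idx + 1 = n then Sum.inl (x, y)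
      else
        match passA rest (idx + 1) n with
        | Sum.inl r => Sum.inl r
        | Sum.inr (rs, idx') => Sum.inr (tl :: rs, idx')

-- the 'while idx < n' loop; Python A diverges when the loop cannot finish (n greater than the
-- number of elements), which Pre_ excludes; fuel n.toNat suffices wherever Python A terminates,
-- since each executed pass increments idx by at least one there.
def whileA : Nat → List (List (Int × Int)) → Int → Int → Int × Int
  | 0, _, _, _ => (-1, -1)
  | fuel + 1, bs, idx, n =>
    if idx < n then
      match passA bs idx n with
      | Sum.inl r => r
      | Sum.inr (bs', idx') => whileA fuel bs' idx' n
    else (-1, -1)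

def get_n_destroy (destroy_list : List (List (Int × Int))) (n : Int) : Int × Int :=
  whileA n.toNat destroy_list 0 n

-- ===== PORT B =====
def get_n_destroy_alt (destroy_list : List (List (Int × Int))) (n : Int) : Int × Int :=
  -- max(map(len, destroy_list), default=0): lengths are ≥ 0, so a fold of max from 0
  let maxLen : Int := (destroy_list.map (fun b => (b.length : Int))).foldl max 0
  -- [b[r] for r in range(max_len) for b in destroy_list if len(b) > r]
  let order : List (Int × Int) :=
    (PySem.List.pyRange 0 maxLen 1).flatMap (fun r =>
      (destroy_list.filter (fun b => decide (r < (b.length : Int)))).map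
        (fun b => (PySem.List.pyGet? b r).getD (-1, -1)))  -- the guard puts r in range; the default is never used
  if 1 ≤ n ∧ n ≤ (order.length : Int) then (PySem.List.pyGet? order (n - 1)).getD (-1, -1)
  else (-1, -1)

-- ===== PRECONDITION & SPEC =====
-- Pre_ excludes exactly the inputs where Python A never returns: it loops forever once
-- every bucket is empty but idx < n, i.e. whenever n exceeds the total number of elements.
def Pre_get_n_destroy (destroy_list : List (List (Int × Int))) (n : Int) : Prop :=
  n ≤ 0 ∨ n ≤ ((destroy_list.map List.length).sum : Int)
instance (destroy_list : List (List (Int × Int))) (n : Int) : Decidable (Pre_get_n_destroy destroy_list n) := by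
  unfold Pre_get_n_destroy; infer_instance
def pvWitness_get_n_destroy : (List (List (Int × Int))) × Int := ([[(1, 2)], [(3, 4), (5, 6)]], 2)

def Spec_get_n_destroy (destroy_list : List (List (Int × Int))) (n : Int) (out : Int × Int) : Prop := out = get_n_destroy_alt destroy_list n
instance (destroy_list : List (List (Int × Int))) (n : Int) (out : Int × Int) : Decidable (Spec_get_n_destroy destroy_list n out) := by unfold Spec_get_n_destroy; infer_instance

-- ===== CLAIM (what is proved, stated in full; the proofs are below) =====
def Claim_equal_get_n_destroy : Prop := ∀ (destroy_list : List (List (Int × Int))) (n : Int), Dom_get_n_destroy destroy_list n → Pre_get_n_destroy destroy_list n → Spec_get_n_destroy destroy_list n (get_n_destroy destroy_list n)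

-- ===== LEMMAS AND PROOFS =====

-- total number of elements
def totalL (l : List (List (Int × Int))) : Nat := (l.map List.length).sum
-- heads of the nonempty buckets, in order = one round of destruction
def headsL (l : List (List (Int × Int))) : List (Int × Int) := l.filterMap List.head?
-- destruction order, m rounds deep
def seqL : Nat → List (List (Int × Int)) → List (Int × Int)
  | 0, _ => []
  | m + 1, l => headsL l ++ seqL m (l.map List.tail)
-- max bucket length
def maxNatL (l : List (List (Int × Int))) : Nat := (l.map List.length).foldl max 0

def nthL (xs : List (Int × Int)) (k : Nat) : Int × Int := xs.getD k (-1, -1)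

theorem totalL_eq (l : List (List (Int × Int))) :
    totalL l = (headsL l).length + totalL (l.map List.tail) := by
  induction l with
  | nil => rfl
  | cons b rest ih =>
    cases b with
    | nil => simpa [totalL, headsL, List.filterMap_cons] using ih
    | cons p tl =>
      simp only [totalL, headsL, List.map_cons, List.sum_cons, List.filterMap_cons,
        List.head?_cons, List.length_cons, List.tail_cons] at *
      omega

theorem headsL_nil_total (l : List (List (Int × Int))) (h : headsL l = []) : totalL l = 0 := by
  induction l with
  | nil => rfl
  | cons b rest ih =>
    cases b with
    | nil =>
      simp only [headsL, List.filterMap_cons, List.head?_nil] at h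
      simpa [totalL] using ih h
    | cons p tl => simp [headsL] at h

theorem foldl_max_le_le (xs : List Nat) (a : Nat) (x : Nat) (hx : x ∈ xs ∨ x ≤ a) :
    x ≤ xs.foldl max a := by
  induction xs generalizing a with
  | nil => simpa using hx
  | cons y ys ih =>
    simp only [List.mem_cons] at hx
    apply ih
    rcases hx with (rfl | h) | h
    · right; exact le_max_right _ _
    · left; exact h
    · right; exact le_trans h (le_max_left _ _)

theorem len_le_maxNatL (l : List (List (Int × Int))) (b : List (Int × Int)) (hb : b ∈ l) :
    b.length ≤ maxNatL l := by
  exact foldl_max_le_le _ 0 _ (Or.inl (List.mem_map_of_mem hb))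

theorem foldl_max_le (xs : List Nat) (a c : Nat) (ha : a ≤ c) (hxs : ∀ x ∈ xs, x ≤ c) :
    xs.foldl max a ≤ c := by
  induction xs generalizing a with
  | nil => simpa using ha
  | cons y ys ih =>
    exact ih _ (max_le ha (hxs y List.mem_cons_self)) (fun x hx => hxs x (List.mem_cons_of_mem _ hx))

theorem headsL_eq_nil_iff (l : List (List (Int × Int))) :
    headsL l = [] ↔ ∀ b ∈ l, b = [] := by
  simp only [headsL, List.filterMap_eq_nil_iff]
  constructor
  · intro h b hb; cases b with
    | nil => rfl
    | cons p tl => exact absurd (h _ hb) (by simp)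
  · intro h b hb; rw [h b hb]; rfl

theorem totalL_zero_of_maxNatL_zero (l : List (List (Int × Int))) (h : maxNatL l = 0) :
    totalL l = 0 := by
  apply List.sum_eq_zero
  intro x hx
  rcases List.mem_map.mp hx with ⟨b, hb, rfl⟩
  have := len_le_maxNatL l b hb
  omega

theorem all_nil_of_total_zero (l : List (List (Int × Int))) (h : totalL l = 0) :
    ∀ b ∈ l, b = [] := by
  intro b hb
  have hle : b.length ≤ (l.map List.length).sum :=
    List.single_le_sum (by simp) _ (List.mem_map_of_mem hb)
  simp only [totalL] at h
  exact List.eq_nil_of_length_eq_zero (by omega)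

theorem seqL_of_total_zero (m : Nat) (l : List (List (Int × Int))) (h : totalL l = 0) :
    seqL m l = [] := by
  induction m generalizing l with
  | zero => rfl
  | succ m ih =>
    have hall := all_nil_of_total_zero l h
    rw [seqL, (headsL_eq_nil_iff l).mpr hall, List.nil_append]
    apply ih
    simp only [totalL, List.map_map]
    apply List.sum_eq_zero
    intro x hx
    rcases List.mem_map.mp hx with ⟨b, hb, rfl⟩
    simp [hall b hb]

theorem maxNatL_tail_lt (l : List (List (Int × Int))) (h : headsL l ≠ []) :
    maxNatL (l.map List.tail) < maxNatL l := by
  have hex : ∃ b ∈ l, b ≠ [] := by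
    by_contra hc
    push Not at hc
    exact h ((headsL_eq_nil_iff l).mpr hc)
  rcases hex with ⟨b, hb, hbne⟩
  have h1 : 1 ≤ maxNatL l := by
    have := len_le_maxNatL l b hb
    have : 0 < b.length := List.length_pos_iff.mpr hbne
    omega
  have h2 : maxNatL (l.map List.tail) ≤ maxNatL l - 1 := by
    apply foldl_max_le _ 0 _ (by omega)
    intro x hx
    rcases List.mem_map.mp hx with ⟨c, hc, rfl⟩
    rcases List.mem_map.mp hc with ⟨d, hd, rfl⟩
    have := len_le_maxNatL l d hd
    simp only [List.length_tail]
    omega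
  omega

theorem seqL_length (m : Nat) (l : List (List (Int × Int))) (hm : maxNatL l ≤ m) :
    (seqL m l).length = totalL l := by
  induction m generalizing l with
  | zero =>
    -- maxNatL l = 0 → every bucket is empty → totalL l = 0
    have : totalL l = 0 := totalL_zero_of_maxNatL_zero l (Nat.le_zero.mp hm)
    simp [seqL, this]
  | succ m ih =>
    by_cases hh : headsL l = []
    · have ht : totalL l = 0 := headsL_nil_total l hh
      simp [seqL_of_total_zero _ _ ht, ht]
    · have := maxNatL_tail_lt l hh
      rw [seqL, List.length_append, ih (l.map List.tail) (by omega), totalL_eq l]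

theorem passA_spec (l : List (List (Int × Int))) (idx n : Int) (h : idx < n) :
    passA l idx n =
      if n ≤ idx + ((headsL l).length : Int)
      then Sum.inl (nthL (headsL l) (n - idx - 1).toNat)
      else Sum.inr (l.map List.tail, idx + ((headsL l).length : Int)) := by
  induction l generalizing idx with
  | nil =>
    simp only [passA, headsL, List.filterMap_nil, List.length_nil, Int.natCast_zero, add_zero,
      List.map_nil]
    rw [if_neg (by omega)]
  | cons b rest ih =>
    cases b with
    | nil =>
      have hh : headsL ([] :: rest) = headsL rest := by simp [headsL]
      simp only [passA]
      rw [ih idx h, hh]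
      by_cases hc : n ≤ idx + ((headsL rest).length : Int)
      · rw [if_pos hc, if_pos hc]
      · rw [if_neg hc, if_neg hc]
        simp
    | cons p tl =>
      obtain ⟨x, y⟩ := p
      have hh : headsL (((x, y) :: tl) :: rest) = (x, y) :: headsL rest := by simp [headsL]
      simp only [passA]
      rw [hh]
      by_cases h1 : idx + 1 = n
      · rw [if_pos h1, if_pos (by simp only [List.length_cons]; push_cast; omega)]
        have hk : (n - idx - 1).toNat = 0 := by omega
        simp [hk, nthL]
      · rw [if_neg h1, ih (idx + 1) (by omega)]
        by_cases hc : n ≤ idx + 1 + ((headsL rest).length : Int)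
        · rw [if_pos hc, if_pos (by simp only [List.length_cons]; push_cast; omega)]
          have hk : (n - idx - 1).toNat = (n - (idx + 1) - 1).toNat + 1 := by omega
          simp [nthL, hk]
        · rw [if_neg hc, if_neg (by simp only [List.length_cons]; push_cast; omega)]
          simp only [Sum.inr.injEq, Prod.mk.injEq, List.map_cons, List.tail_cons,
            List.length_cons, true_and]
          push_cast
          omega

theorem whileA_spec (fuel : Nat) (l : List (List (Int × Int))) (idx n : Int) (m : Nat)
    (h1 : idx < n) (h2 : n ≤ idx + (totalL l : Int)) (hf : (n - idx).toNat ≤ fuel)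
    (hm : maxNatL l ≤ m) :
    whileA fuel l idx n = nthL (seqL m l) (n - idx - 1).toNat := by
  induction fuel generalizing l idx m with
  | zero => omega
  | succ fuel ih =>
    rw [whileA, if_pos h1, passA_spec l idx n h1]
    -- m ≥ 1: some bucket is nonempty since totalL l > 0
    have htpos : 0 < totalL l := by omega
    have hmax : 0 < maxNatL l := by
      by_contra hz
      have := totalL_zero_of_maxNatL_zero l (by omega)
      omega
    obtain ⟨m', rfl⟩ : ∃ m', m = m' + 1 := ⟨m - 1, by omega⟩
    rw [seqL]
    by_cases hc : n ≤ idx + ((headsL l).length : Int)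
    · rw [if_pos hc]
      have hk : (n - idx - 1).toNat < (headsL l).length := by omega
      show nthL (headsL l) (n - idx - 1).toNat = nthL (headsL l ++ seqL m' (List.map List.tail l)) (n - idx - 1).toNat
      simp only [nthL]
      rw [List.getD_append _ _ _ _ hk]
    · rw [if_neg hc]
      have hne : headsL l ≠ [] := by
        intro hnil
        have := headsL_nil_total l hnil
        omega
      have hlenpos : 0 < (headsL l).length := List.length_pos_iff.mpr hne
      have htl := totalL_eq l
      show whileA fuel (List.map List.tail l) (idx + ((headsL l).length : Int)) n =
        nthL (headsL l ++ seqL m' (List.map List.tail l)) (n - idx - 1).toNat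
      rw [ih (l.map List.tail) (idx + ((headsL l).length : Int)) m'
        (by omega) (by omega)
        (by omega) (by have := maxNatL_tail_lt l hne; omega)]
      have hk : (n - idx - 1).toNat = (headsL l).length + (n - (idx + ((headsL l).length : Int)) - 1).toNat := by omega
      rw [hk]
      simp only [nthL, List.getD_eq_getElem?_getD]
      rw [List.getElem?_append_right (by omega), Nat.add_sub_cancel_left]

theorem foldl_max_cast_aux (xs : List (List (Int × Int))) (a : Nat) :
    ((xs.map (fun b => (b.length : Int))).foldl max (a : Int)) =
      (((xs.map List.length).foldl max a : Nat) : Int) := by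
  induction xs generalizing a with
  | nil => rfl
  | cons b rest ih =>
    simp only [List.map_cons, List.foldl_cons]
    rw [show max (a : Int) ((b.length : Int)) = ((max a b.length : Nat) : Int) by
      simp [Nat.cast_max], ih]

theorem foldl_max_cast (xs : List (List (Int × Int))) :
    ((xs.map (fun b => (b.length : Int))).foldl max 0) = ((maxNatL xs : Nat) : Int) := by
  simpa [maxNatL] using foldl_max_cast_aux xs 0

theorem roundZeroL (l : List (List (Int × Int))) :
    (l.filter (fun b => decide (0 < b.length))).map (fun b => b.getD 0 (-1, -1)) = headsL l := by
  induction l with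
  | nil => rfl
  | cons b rest ih =>
    cases b with
    | nil => simpa [headsL, List.filter_cons] using ih
    | cons p tl =>
      rw [List.filter_cons_of_pos (by simp), List.map_cons]
      rw [show ((p :: tl).getD 0 (-1, -1)) = p from rfl]
      simpa [headsL] using congrArg (List.cons p) ih

theorem roundSuccL (l : List (List (Int × Int))) (r : Nat) :
    (l.filter (fun b => decide (r + 1 < b.length))).map (fun b => b.getD (r + 1) (-1, -1)) =
      ((l.map List.tail).filter (fun b => decide (r < b.length))).map (fun b => b.getD r (-1, -1)) := by
  induction l with
  | nil => rfl
  | cons b rest ih =>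
    cases b with
    | nil => simpa [List.filter_cons] using ih
    | cons p tl =>
      by_cases hr : r < tl.length
      · simp only [List.map_cons, List.tail_cons, List.filter_cons, List.length_cons]
        rw [if_pos (by simpa using hr), if_pos (by simpa using hr)]
        simp only [List.map_cons]
        exact congrArg₂ List.cons rfl ih
      · simp only [List.map_cons, List.tail_cons, List.filter_cons, List.length_cons]
        rw [if_neg (by simpa using hr), if_neg (by simpa using hr)]
        exact ih

theorem G_eq_seq (m : Nat) (l : List (List (Int × Int))) :
    (List.range m).flatMap
        (fun r => (l.filter (fun b => decide (r < b.length))).map (fun b => b.getD r (-1, -1))) =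
      seqL m l := by
  induction m generalizing l with
  | zero => rfl
  | succ m ih =>
    rw [List.range_succ_eq_map, List.flatMap_cons, List.flatMap_map]
    rw [seqL, ← roundZeroL l]
    congr 1
    rw [← ih (l.map List.tail)]
    have hfun : (fun (r : Nat) =>
        (l.filter (fun b => decide (r + 1 < b.length))).map (fun b => b.getD (r + 1) (-1, -1))) =
        (fun (r : Nat) =>
        ((l.map List.tail).filter (fun b => decide (r < b.length))).map (fun b => b.getD r (-1, -1))) :=
      funext fun r => roundSuccL l r
    rw [show (fun (r : Nat) =>
        (l.filter (fun b => decide (r.succ < b.length))).map (fun b => b.getD r.succ (-1, -1))) =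
        (fun (r : Nat) =>
        (l.filter (fun b => decide (r + 1 < b.length))).map (fun b => b.getD (r + 1) (-1, -1))) from rfl,
      hfun]

theorem alt_eq_seq (l : List (List (Int × Int))) (n : Int) :
    get_n_destroy_alt l n =
      if 1 ≤ n ∧ n ≤ (totalL l : Int) then nthL (seqL (maxNatL l) l) (n - 1).toNat
      else (-1, -1) := by
  have horder :
      (PySem.List.pyRange 0 ((l.map (fun b => (b.length : Int))).foldl max 0) 1).flatMap
          (fun r => (l.filter (fun b => decide (r < (b.length : Int)))).map
            (fun b => (PySem.List.pyGet? b r).getD (-1, -1))) =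
        seqL (maxNatL l) l := by
    rw [foldl_max_cast l, PySem.List.pyRange_one]
    simp only [sub_zero, Int.toNat_natCast, zero_add]
    rw [List.flatMap_map, ← G_eq_seq (maxNatL l) l]
    have hfun : (fun (r : Nat) =>
        (l.filter (fun b => decide ((r : Int) < (b.length : Int)))).map
          (fun b => (PySem.List.pyGet? b (r : Int)).getD (-1, -1))) =
        (fun (r : Nat) =>
        (l.filter (fun b => decide (r < b.length))).map (fun b => b.getD r (-1, -1))) := by
      funext r
      simp [PySem.List.pyGet?_natCast, Nat.cast_lt, List.getD_eq_getElem?_getD]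
    rw [hfun]
  simp only [get_n_destroy_alt]
  rw [horder]
  by_cases hc : 1 ≤ n ∧ n ≤ ((seqL (maxNatL l) l).length : Int)
  · rw [if_pos hc, if_pos (by rwa [seqL_length (maxNatL l) l le_rfl] at hc)]
    rcases hc with ⟨hc1, hc2⟩
    rw [PySem.List.pyGet?_of_nonneg (h := show (0 : Int) ≤ n - 1 by omega)]
    simp [nthL, List.getD_eq_getElem?_getD]
  · rw [if_neg hc, if_neg (by rwa [seqL_length (maxNatL l) l le_rfl] at hc)]

-- ===== VERDICT (by name: the statement is the Claim_ definition above) =====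
theorem get_n_destroy_spec : Claim_equal_get_n_destroy := by
  intro l n _hd hp
  unfold Spec_get_n_destroy get_n_destroy
  rw [alt_eq_seq]
  by_cases h0 : n ≤ 0
  · rw [if_neg (by omega), show n.toNat = 0 by omega]
    rfl
  · have h1 : 1 ≤ n := by omega
    have h2 : n ≤ (totalL l : Int) := by
      rcases hp with h | h
      · omega
      · simpa [totalL] using h
    rw [if_pos ⟨h1, h2⟩]
    have hs := whileA_spec n.toNat l 0 n (maxNatL l) (by omega) (by omega) (by omega) le_rfl
    rw [show n - 0 - 1 = n - 1 by ring] at hs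
    exact hs
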